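-- pv_equiv track=rewrite | github.com/oceanefrqt/fastBMC | Module_fastBMC/monotonic_classifier.py | breakpoint_b
-- ===== SOURCE A (Python) =====
-- def breakpoint_b(X, b_p, rev, up):
--     # Determine blue (class 0) breakpoints based on the direction of isotonicity.
--
--     #Parameters:
--     #- X: sorted data array
--     #- b_p: list of blue points
--     #- rev: boolean indicating whether it's a reversed direction
--     #- up: boolean indicating whether it's an increasing isotonicity
--
--     #Returns:
--     #- List of blue breakpoints.
--
--
--
--     bpb = list()
--     b_ps = sorted(b_p)
--     if not rev and up: #CASE 1
--         while len(b_ps) != 0: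
--             maxi = b_ps[-1]
--             x, y = maxi
--             bpb.append(maxi)
--             b_ps = [pt for pt in b_ps if pt[1] > y]
--             b_ps = sorted(b_ps)
--
--
--     elif rev and up: #CASE 2
--         while len(b_ps) != 0:
--             maxi = b_ps[0]
--             x, y = maxi
--             bpb.append(maxi)
--             b_ps = [pt for pt in b_ps if pt[1] > y]
--             b_ps = sorted(b_ps)
--
--     elif not rev and not up: #CASE 3
--         while len(b_ps) != 0:
--             maxi = b_ps[0]
--             x, y = maxi
--             bpb.append(maxi)
--             b_ps = [pt for pt in b_ps if pt[0] > x]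
--             b_ps = sorted(b_ps)
--
--     elif rev and not up: #CASE 4
--         while len(b_ps) != 0:
--             maxi = b_ps[-1]
--             x, y = maxi
--             bpb.append(maxi)
--             b_ps = [pt for pt in b_ps if pt[0] < x]
--             b_ps = sorted(b_ps)
--     return bpb
-- ===== SOURCE B (Python) =====
-- def _sweep(pts, key, keep):
--     # one monotone pass: keep a point iff its key beats the running threshold
--     out = []
--     last = None
--     for p in pts:
--         k = key(p)
--         if last is None or keep(k, last):
--             out.append(p)
--             last = k
--     return out
--
--
-- def breakpoint_b(X, b_p, rev, up):
--     bs = sorted(b_p)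
--     if not rev and up:
--         return _sweep(reversed(bs), lambda p: p[1], lambda a, b: a > b)
--     elif rev and up:
--         return _sweep(bs, lambda p: p[1], lambda a, b: a > b)
--     elif not rev and not up:
--         return _sweep(bs, lambda p: p[0], lambda a, b: a > b)
--     else:
--         return _sweep(reversed(bs), lambda p: p[0], lambda a, b: a < b)
-- ===== Notes on version B (the rewrite author's own statement) =====
-- stated objective: alternative
-- what changed: A repeatedly picks the extremal remaining point, list-filters the survivors and re-sorts inside a while loop; B sorts once and does a single linear monotone-threshold sweep over the sorted (or reversed sorted) list, keeping a point iff its x- or y-key beats the running threshold.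
import Mathlib
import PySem

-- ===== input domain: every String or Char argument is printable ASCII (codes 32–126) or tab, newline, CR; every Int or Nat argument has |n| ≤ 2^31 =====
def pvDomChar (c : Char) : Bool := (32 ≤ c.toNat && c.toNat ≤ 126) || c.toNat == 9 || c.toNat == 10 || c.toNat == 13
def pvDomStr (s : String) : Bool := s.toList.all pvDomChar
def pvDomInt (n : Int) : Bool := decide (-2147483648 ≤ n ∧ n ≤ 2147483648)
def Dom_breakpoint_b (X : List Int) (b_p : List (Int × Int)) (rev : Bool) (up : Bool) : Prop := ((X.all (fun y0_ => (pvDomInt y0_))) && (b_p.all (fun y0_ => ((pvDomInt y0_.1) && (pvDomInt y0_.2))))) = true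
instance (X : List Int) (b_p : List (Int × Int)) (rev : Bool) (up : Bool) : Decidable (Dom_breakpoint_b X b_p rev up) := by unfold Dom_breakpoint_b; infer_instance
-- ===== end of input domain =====

-- B replaces A's repeated "pick extremal point, filter, re-sort" while-loop by one sort plus a
-- single monotone-threshold sweep over the sorted (or reversed) list; same output.

-- ===== PORT A =====
-- Python tuples compare lexicographically, so sorted(b_p) is PySem.List.sorted with the
-- lexicographic key on the pair (exact: Prod.Lex on Int × Int is Python's tuple order).
def lexKey (p : Int × Int) : Int ×ₗ Int := toLex p

-- CASE 1 while-loop: maxi = b_ps[-1]; keep pt with pt[1] > y; re-sort.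
def loopA1 (l : List (Int × Int)) : List (Int × Int) :=
  match h : PySem.List.pyGet? l (-1) with
  | none => []
  | some maxi =>
    maxi :: loopA1 (PySem.List.sorted (l.filter (fun pt => decide (pt.2 > maxi.2))) lexKey false)
termination_by l.length
decreasing_by
  simp only [PySem.List.length_sorted, List.length_unattach]
  refine Nat.lt_of_lt_of_eq ?_ List.length_attach
  refine List.length_filter_lt_length_iff_exists.mpr
    ⟨⟨maxi, PySem.List.mem_of_pyGet?_eq_some l h⟩, List.mem_attach _ _, ?_⟩
  simp

-- CASE 2 while-loop: maxi = b_ps[0]; keep pt with pt[1] > y; re-sort.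
def loopA2 (l : List (Int × Int)) : List (Int × Int) :=
  match h : PySem.List.pyGet? l 0 with
  | none => []
  | some maxi =>
    maxi :: loopA2 (PySem.List.sorted (l.filter (fun pt => decide (pt.2 > maxi.2))) lexKey false)
termination_by l.length
decreasing_by
  simp only [PySem.List.length_sorted, List.length_unattach]
  refine Nat.lt_of_lt_of_eq ?_ List.length_attach
  refine List.length_filter_lt_length_iff_exists.mpr
    ⟨⟨maxi, PySem.List.mem_of_pyGet?_eq_some l h⟩, List.mem_attach _ _, ?_⟩
  simp

-- CASE 3 while-loop: maxi = b_ps[0]; keep pt with pt[0] > x; re-sort.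
def loopA3 (l : List (Int × Int)) : List (Int × Int) :=
  match h : PySem.List.pyGet? l 0 with
  | none => []
  | some maxi =>
    maxi :: loopA3 (PySem.List.sorted (l.filter (fun pt => decide (pt.1 > maxi.1))) lexKey false)
termination_by l.length
decreasing_by
  simp only [PySem.List.length_sorted, List.length_unattach]
  refine Nat.lt_of_lt_of_eq ?_ List.length_attach
  refine List.length_filter_lt_length_iff_exists.mpr
    ⟨⟨maxi, PySem.List.mem_of_pyGet?_eq_some l h⟩, List.mem_attach _ _, ?_⟩
  simp

-- CASE 4 while-loop: maxi = b_ps[-1]; keep pt with pt[0] < x; re-sort.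
def loopA4 (l : List (Int × Int)) : List (Int × Int) :=
  match h : PySem.List.pyGet? l (-1) with
  | none => []
  | some maxi =>
    maxi :: loopA4 (PySem.List.sorted (l.filter (fun pt => decide (pt.1 < maxi.1))) lexKey false)
termination_by l.length
decreasing_by
  simp only [PySem.List.length_sorted, List.length_unattach]
  refine Nat.lt_of_lt_of_eq ?_ List.length_attach
  refine List.length_filter_lt_length_iff_exists.mpr
    ⟨⟨maxi, PySem.List.mem_of_pyGet?_eq_some l h⟩, List.mem_attach _ _, ?_⟩
  simp

def breakpoint_b (X : List Int) (b_p : List (Int × Int)) (rev : Bool) (up : Bool) : List (Int × Int) :=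
  let b_ps := PySem.List.sorted b_p lexKey false
  if !rev && up then loopA1 b_ps
  else if rev && up then loopA2 b_ps
  else if !rev && !up then loopA3 b_ps
  else loopA4 b_ps

-- ===== PORT B =====
-- _sweep of Source B: keep a point iff its key beats the running threshold (none = first point).
def sweep (key : Int × Int → Int) (keep : Int → Int → Bool) :
    List (Int × Int) → Option Int → List (Int × Int)
  | [], _ => []
  | p :: t, none => p :: sweep key keep t (some (key p))
  | p :: t, some m =>
    if keep (key p) m then p :: sweep key keep t (some (key p)) else sweep key keep t (some m)

def breakpoint_b_alt (X : List Int) (b_p : List (Int × Int)) (rev : Bool) (up : Bool) : List (Int × Int) :=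
  let bs := PySem.List.sorted b_p lexKey false
  if !rev && up then sweep (fun p => p.2) (fun a b => decide (a > b)) bs.reverse none
  else if rev && up then sweep (fun p => p.2) (fun a b => decide (a > b)) bs none
  else if !rev && !up then sweep (fun p => p.1) (fun a b => decide (a > b)) bs none
  else sweep (fun p => p.1) (fun a b => decide (a < b)) bs.reverse none

-- ===== PRECONDITION & SPEC =====
def Spec_breakpoint_b (X : List Int) (b_p : List (Int × Int)) (rev : Bool) (up : Bool) (out : List (Int × Int)) : Prop := out = breakpoint_b_alt X b_p rev up
instance (X : List Int) (b_p : List (Int × Int)) (rev : Bool) (up : Bool) (out : List (Int × Int)) : Decidable (Spec_breakpoint_b X b_p rev up out) := by unfold Spec_breakpoint_b; infer_instance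

-- ===== CLAIM (what is proved, stated in full; the proofs are below) =====
def Claim_equal_breakpoint_b : Prop := ∀ (X : List Int) (b_p : List (Int × Int)) (rev : Bool) (up : Bool), Dom_breakpoint_b X b_p rev up → Spec_breakpoint_b X b_p rev up (breakpoint_b X b_p rev up)

-- ===== LEMMAS AND PROOFS =====

-- Elements the filter removes would be skipped by the sweep anyway (the threshold only grows
-- along `keep`), so sweeping the filtered list with threshold m' equals sweeping the whole list.
theorem sweep_filter (key : Int × Int → Int) (keep : Int → Int → Bool)
    (htr : ∀ j k m, keep j m = false → keep k m = true → keep j k = false) :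
    ∀ (xs : List (Int × Int)) (m m' : Int), (∀ k, keep k m = false → keep k m' = false) →
      sweep key keep (xs.filter (fun p => keep (key p) m)) (some m') =
        sweep key keep xs (some m') := by
  intro xs
  induction xs with
  | nil => intro m m' _; simp [sweep]
  | cons p t ih =>
    intro m m' hmm'
    by_cases hp : keep (key p) m = true
    · by_cases hq : keep (key p) m' = true
      · simp only [List.filter_cons, hp, if_true, sweep, hq]
        exact congrArg (p :: ·) (ih m (key p) (fun k hk => htr k (key p) m hk hp))
      · simp only [List.filter_cons, hp, if_true, sweep, hq, Bool.false_eq_true, if_false]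
        exact ih m m' hmm'
    · have hp' : keep (key p) m = false := by simpa using hp
      have hq : keep (key p) m' = false := hmm' _ hp'
      simp only [List.filter_cons, hp', Bool.false_eq_true, if_false, sweep, hq]
      exact ih m m' hmm'

-- Generic invariant for the "pick FIRST point, filter by keep, re-sort" loop: on a
-- lex-sorted list it is the forward sweep.
theorem loop_fwd_eq_sweep (f : List (Int × Int) → List (Int × Int))
    (key : Int × Int → Int) (keep : Int → Int → Bool)
    (hf : ∀ l, f l =
      match PySem.List.pyGet? l 0 with
      | none => []
      | some maxi =>
        maxi :: f (PySem.List.sorted (l.filter (fun pt => keep (key pt) (key maxi))) lexKey false))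
    (htr : ∀ j k m, keep j m = false → keep k m = true → keep j k = false)
    (hirr : ∀ k, keep k k = false) :
    ∀ (n : Nat) (l : List (Int × Int)), l.length ≤ n →
      l.Pairwise (fun a b => lexKey a ≤ lexKey b) →
      ∀ (o : Option Int), (∀ m, o = some m → ∀ p ∈ l, keep (key p) m = true) →
        f l = sweep key keep l o := by
  intro n
  induction n with
  | zero =>
    intro l hn _ o _
    have : l = [] := List.length_eq_zero_iff.mp (Nat.le_zero.mp hn)
    subst this; rw [hf]; simp [PySem.List.pyGet?, sweep]
  | succ m ih =>
    intro l hn hpw o ho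
    match l with
    | [] => rw [hf]; simp [PySem.List.pyGet?, sweep]
    | a :: t =>
      rw [hf]
      simp only [PySem.List.pyGet?_zero_cons]
      have hfil : (a :: t).filter (fun pt => keep (key pt) (key a)) =
          t.filter (fun pt => keep (key pt) (key a)) := by
        simp [hirr]
      rw [hfil]
      have hpt : (t.filter (fun pt => keep (key pt) (key a))).Pairwise
          (fun a b => lexKey a ≤ lexKey b) := ((List.pairwise_cons.mp hpw).2).filter _
      rw [PySem.List.sorted_eq_self_of_pairwise _ _ hpt]
      have hlen : (t.filter (fun pt => keep (key pt) (key a))).length ≤ m := by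
        have := List.length_filter_le (fun pt => keep (key pt) (key a)) t
        simp only [List.length_cons] at hn; omega
      have := ih _ hlen hpt
        (some (key a)) (by intro m' hm p hp; cases hm; exact (List.mem_filter.mp hp).2)
      rw [this, sweep_filter key keep htr t (key a) (key a) (fun k hk => hk)]
      cases o with
      | none => rfl
      | some m' =>
        have : keep (key a) m' = true := ho m' rfl a (List.mem_cons_self)
        simp [sweep, this]

-- Same invariant for the "pick LAST point" loops: they are the sweep over the REVERSED list.
theorem loop_rev_eq_sweep (f : List (Int × Int) → List (Int × Int))
    (key : Int × Int → Int) (keep : Int → Int → Bool)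
    (hf : ∀ l, f l =
      match PySem.List.pyGet? l (-1) with
      | none => []
      | some maxi =>
        maxi :: f (PySem.List.sorted (l.filter (fun pt => keep (key pt) (key maxi))) lexKey false))
    (htr : ∀ j k m, keep j m = false → keep k m = true → keep j k = false)
    (hirr : ∀ k, keep k k = false) :
    ∀ (n : Nat) (l : List (Int × Int)), l.length ≤ n →
      l.Pairwise (fun a b => lexKey a ≤ lexKey b) →
      ∀ (o : Option Int), (∀ m, o = some m → ∀ p ∈ l, keep (key p) m = true) →
        f l = sweep key keep l.reverse o := by
  intro n
  induction n with
  | zero =>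
    intro l hn _ o _
    have : l = [] := List.length_eq_zero_iff.mp (Nat.le_zero.mp hn)
    subst this; rw [hf]; simp [PySem.List.pyGet?, sweep]
  | succ mn ih =>
    intro l hn hpw o ho
    match hrev : l.reverse with
    | [] =>
      have : l = [] := by simpa using congrArg List.reverse hrev
      subst this; rw [hf]; simp [PySem.List.pyGet?, sweep]
    | a :: r =>
      have hl : l = r.reverse ++ [a] := by
        have := congrArg List.reverse hrev
        simpa using this
      rw [hf]
      have hlast : PySem.List.pyGet? l (-1) = some a := by
        rw [PySem.List.pyGet?_neg_one, hl]; simp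
      simp only [hlast]
      have hfil : l.filter (fun pt => keep (key pt) (key a)) =
          r.reverse.filter (fun pt => keep (key pt) (key a)) := by
        rw [hl, List.filter_append]; simp [hirr]
      rw [hfil]
      have hsubl : (r.reverse.filter (fun pt => keep (key pt) (key a))).Sublist l := by
        rw [hl]
        exact List.filter_sublist.trans (List.sublist_append_left _ _)
      have hpt : (r.reverse.filter (fun pt => keep (key pt) (key a))).Pairwise
          (fun a b => lexKey a ≤ lexKey b) := hpw.sublist hsubl
      rw [PySem.List.sorted_eq_self_of_pairwise _ _ hpt]
      have hlen : (r.reverse.filter (fun pt => keep (key pt) (key a))).length ≤ mn := by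
        have h1 := List.length_filter_le (fun pt => keep (key pt) (key a)) r.reverse
        have h2 : l.length = r.length + 1 := by rw [hl]; simp
        simp only [List.length_reverse] at h1 ⊢; omega
      have hih := ih _ hlen hpt (some (key a))
        (by intro m hm p hp; cases hm; exact (List.mem_filter.mp hp).2)
      rw [hih]
      have hfr : (r.reverse.filter (fun pt => keep (key pt) (key a))).reverse =
          r.filter (fun pt => keep (key pt) (key a)) := by
        rw [← List.filter_reverse, List.reverse_reverse]
      rw [hfr, sweep_filter key keep htr r (key a) (key a) (fun k hk => hk)]
      cases o with
      | none => rfl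
      | some m =>
        have ha : keep (key a) m = true := by
          refine ho m rfl a ?_
          rw [hl]; simp
        simp [sweep, ha]

-- the two concrete `keep` relations satisfy the threshold hypotheses
theorem keep_gt_tr : ∀ j k m : Int, decide (j > m) = false → decide (k > m) = true →
    decide (j > k) = false := by intro j k m h1 h2; simp_all; omega
theorem keep_gt_irr : ∀ k : Int, decide (k > k) = false := by intro k; simp
theorem keep_lt_tr : ∀ j k m : Int, decide (j < m) = false → decide (k < m) = true →
    decide (j < k) = false := by intro j k m h1 h2; simp_all; omega
theorem keep_lt_irr : ∀ k : Int, decide (k < k) = false := by intro k; simp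

-- ===== VERDICT (by name: the statement is the Claim_ definition above) =====
theorem breakpoint_b_spec : Claim_equal_breakpoint_b := by
  intro X b_p rev up _
  unfold Spec_breakpoint_b breakpoint_b breakpoint_b_alt
  have hpw : (PySem.List.sorted b_p lexKey false).Pairwise
      (fun a b => lexKey a ≤ lexKey b) := PySem.List.sorted_pairwise b_p lexKey
  cases rev <;> cases up <;> simp only [Bool.not_true, Bool.not_false, Bool.and_self,
    Bool.and_true, Bool.and_false, if_true, Bool.false_eq_true,
    if_false]
  · exact loop_fwd_eq_sweep loopA3 (fun p => p.1) (fun a b => decide (a > b))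
      (fun l => by rw [loopA3.eq_def]; cases PySem.List.pyGet? l 0 <;> rfl) keep_gt_tr keep_gt_irr _ _ le_rfl hpw none (by simp)
  · exact loop_rev_eq_sweep loopA1 (fun p => p.2) (fun a b => decide (a > b))
      (fun l => by rw [loopA1.eq_def]; cases PySem.List.pyGet? l (-1) <;> rfl) keep_gt_tr keep_gt_irr _ _ le_rfl hpw none (by simp)
  · exact loop_rev_eq_sweep loopA4 (fun p => p.1) (fun a b => decide (a < b))
      (fun l => by rw [loopA4.eq_def]; cases PySem.List.pyGet? l (-1) <;> rfl) keep_lt_tr keep_lt_irr _ _ le_rfl hpw none (by simp)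
  · exact loop_fwd_eq_sweep loopA2 (fun p => p.2) (fun a b => decide (a > b))
      (fun l => by rw [loopA2.eq_def]; cases PySem.List.pyGet? l 0 <;> rfl) keep_gt_tr keep_gt_irr _ _ le_rfl hpw none (by simp)
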